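-- pv_equiv track=rewrite | github.com/carmelo-gulino/2023-07-17-A | model/model.py | get_archi_duplicati
-- ===== SOURCE A (Python) =====
-- def get_archi_duplicati(sorted_edges):
--     duplicati = set()
--     for edge in sorted_edges:
--         for node in edge:
--             c = 0
--             for e in sorted_edges:
--                 if node == e[0] or node == e[1]:
--                     c += 1
--             if c > 1:
--                 duplicati.add(node)
--     return duplicati
-- ===== SOURCE B (Python) =====
-- def get_archi_duplicati(sorted_edges):
--     nodes = []
--     for a, b in sorted_edges:
--         nodes.append(a)
--         if b != a:
--             nodes.append(b)
--     counts = {}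
--     for n in nodes:
--         counts[n] = counts.get(n, 0) + 1
--     return {n for n, c in counts.items() if c > 1}
-- ===== Notes on version B (the rewrite author's own statement) =====
-- stated objective: faster
-- what changed: Replaced A's triple-nested rescan (for each endpoint of each edge, re-scan all edges to count) by one pass that tallies per-node edge counts in a dict and a single filter of its items, removing the inner scans.
import Mathlib
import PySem

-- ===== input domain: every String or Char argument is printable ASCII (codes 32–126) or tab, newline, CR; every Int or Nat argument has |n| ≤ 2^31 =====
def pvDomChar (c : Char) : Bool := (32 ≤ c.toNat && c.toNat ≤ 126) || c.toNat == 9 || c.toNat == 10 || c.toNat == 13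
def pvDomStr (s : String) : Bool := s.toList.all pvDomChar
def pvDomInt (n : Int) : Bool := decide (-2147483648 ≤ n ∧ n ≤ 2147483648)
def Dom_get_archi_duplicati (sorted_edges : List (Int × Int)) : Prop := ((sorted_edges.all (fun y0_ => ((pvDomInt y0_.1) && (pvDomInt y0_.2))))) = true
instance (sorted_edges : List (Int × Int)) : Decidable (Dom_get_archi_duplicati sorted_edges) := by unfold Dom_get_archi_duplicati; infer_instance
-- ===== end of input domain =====

-- B replaces A's triple-nested O(E^2) rescan by one counting pass over the edges plus a filter of the counts (faster).


-- ===== PORT A =====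
def get_archi_duplicati (sorted_edges : List (Int × Int)) : List Int :=
  sorted_edges.foldl (fun duplicati edge =>
    [edge.1, edge.2].foldl (fun duplicati node =>
      let c : Int := sorted_edges.foldl (fun c e =>
        if node = e.1 ∨ node = e.2 then c + 1 else c) 0
      if c > 1 then PySem.Set.add duplicati node else duplicati) duplicati)
    (PySem.Set.empty)

-- ===== PORT B =====
def get_archi_duplicati_alt (sorted_edges : List (Int × Int)) : List Int :=
  let nodes : List Int := sorted_edges.foldl (fun acc e =>
    let acc := acc ++ [e.1]
    if e.2 ≠ e.1 then acc ++ [e.2] else acc) []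
  -- counts[n] = counts.get(n, 0) + 1, i.e. Dict.modify n 0 (· + 1)
  let counts : PySem.Dict Int Int := nodes.foldl (fun d n => d.modify n 0 (· + 1)) PySem.Dict.empty
  PySem.Set.ofList ((counts.items.filter (fun p => p.2 > 1)).map (fun p => p.1))

-- ===== PRECONDITION & SPEC =====
def Spec_get_archi_duplicati (sorted_edges : List (Int × Int)) (out : List Int) : Prop := out = get_archi_duplicati_alt sorted_edges
instance (sorted_edges : List (Int × Int)) (out : List Int) : Decidable (Spec_get_archi_duplicati sorted_edges out) := by unfold Spec_get_archi_duplicati; infer_instance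

-- ===== CLAIM (what is proved, stated in full; the proofs are below) =====
def Claim_equal_get_archi_duplicati : Prop := ∀ (sorted_edges : List (Int × Int)), Dom_get_archi_duplicati sorted_edges → Spec_get_archi_duplicati sorted_edges (get_archi_duplicati sorted_edges)

-- ===== LEMMAS AND PROOFS =====

-- per-edge node lists: A visits both endpoints, B visits the distinct endpoints
def pvAllNodes (L : List (Int × Int)) : List Int := L.flatMap (fun e => [e.1, e.2])
def pvNodes (L : List (Int × Int)) : List Int :=
  L.flatMap (fun e => if e.2 ≠ e.1 then [e.1, e.2] else [e.1])
-- the count A's innermost loop computes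
def pvCnt (L : List (Int × Int)) (n : Int) : Int :=
  L.foldl (fun c e => if n = e.1 ∨ n = e.2 then c + 1 else c) 0

theorem pvNodes_spec (L : List (Int × Int)) :
    (L.foldl (fun acc e =>
      let acc := acc ++ [e.1]
      if e.2 ≠ e.1 then acc ++ [e.2] else acc) []) = pvNodes L := by
  have h : ∀ (acc : List Int) (e : Int × Int),
      (let acc' := acc ++ [e.1]
       if e.2 ≠ e.1 then acc' ++ [e.2] else acc')
      = acc ++ (if e.2 ≠ e.1 then [e.1, e.2] else [e.1]) := by
    intro acc e; by_cases h : e.2 = e.1 <;> simp [h]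
  calc (L.foldl (fun acc e =>
          let acc := acc ++ [e.1]
          if e.2 ≠ e.1 then acc ++ [e.2] else acc) [])
      = (L.foldl (fun acc e => acc ++ (if e.2 ≠ e.1 then [e.1, e.2] else [e.1])) []) := by
        exact PySem.List.foldl_congr_mem _ _ _ _ (fun acc e _ => h acc e)
    _ = pvNodes L := by
        rw [PySem.List.foldl_append_eq_flatMap]; rfl

theorem pvCnt_eq_count (L : List (Int × Int)) (n : Int) :
    pvCnt L n = ((pvNodes L).count n : Int) := by
  suffices h : ∀ (c : Int), L.foldl (fun c e => if n = e.1 ∨ n = e.2 then c + 1 else c) c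
      = c + ((pvNodes L).count n : Int) by
    simpa using h 0
  induction L with
  | nil => intro c; simp [pvNodes]
  | cons e t ih =>
    intro c
    have : pvNodes (e :: t) = (if e.2 ≠ e.1 then [e.1, e.2] else [e.1]) ++ pvNodes t := by
      simp [pvNodes]
    rw [List.foldl_cons, ih, this, List.count_append]
    by_cases h1 : n = e.1 <;> by_cases h2 : n = e.2 <;> by_cases h3 : e.2 = e.1 <;>
      simp [h1, h2, h3, List.count_cons, List.count_nil] <;> omega

theorem filter_add (p : Int → Bool) (s : PySem.Set Int) (x : Int) :
    (PySem.Set.add s x).filter p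
      = if p x then PySem.Set.add (s.filter p) x else s.filter p := by
  by_cases hx : x ∈ s
  · by_cases hp : p x
    · have : x ∈ s.filter p := List.mem_filter.mpr ⟨hx, hp⟩
      simp [PySem.Set.add, PySem.Set.contains, hx, hp, this]
    · simp [PySem.Set.add, PySem.Set.contains, hx, hp]
  · by_cases hp : p x
    · have : x ∉ s.filter p := fun h => hx (List.mem_filter.mp h).1
      simp [PySem.Set.add, PySem.Set.contains, hx, hp, this, List.filter_append]
    · simp [PySem.Set.add, PySem.Set.contains, hx, hp, List.filter_append]

theorem filter_foldl_add (p : Int → Bool) (ys : List Int) :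
    ∀ (s : PySem.Set Int),
      (List.foldl PySem.Set.add s ys).filter p
        = List.foldl PySem.Set.add (s.filter p) (ys.filter p) := by
  induction ys with
  | nil => intro s; simp
  | cons y t ih =>
    intro s
    rw [List.foldl_cons, ih, filter_add p s y, List.filter_cons]
    by_cases hp : p y <;> simp [hp]

theorem ofList_filter (p : Int → Bool) (ys : List Int) :
    PySem.Set.ofList (ys.filter p) = (PySem.Set.ofList ys).filter p := by
  rw [PySem.Set.ofList_eq_foldl, PySem.Set.ofList_eq_foldl, filter_foldl_add]
  rfl

theorem ofList_allNodes_eq (L : List (Int × Int)) :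
    ∀ (s : PySem.Set Int),
      List.foldl PySem.Set.add s (pvAllNodes L) = List.foldl PySem.Set.add s (pvNodes L) := by
  induction L with
  | nil => intro s; rfl
  | cons e t ih =>
    intro s
    have hA : pvAllNodes (e :: t) = [e.1, e.2] ++ pvAllNodes t := by simp [pvAllNodes]
    have hN : pvNodes (e :: t) = (if e.2 ≠ e.1 then [e.1, e.2] else [e.1]) ++ pvNodes t := by
      simp [pvNodes]
    rw [hA, hN, List.foldl_append, List.foldl_append, ih]
    by_cases h : e.2 = e.1
    · simp [h]  -- self-loop: second add of the same endpoint is a no-op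
    · simp [h]

theorem a_eq_filter (L : List (Int × Int)) :
    get_archi_duplicati L
      = (PySem.Set.ofList (pvNodes L)).filter (fun n => decide (pvCnt L n > 1)) := by
  unfold get_archi_duplicati
  rw [show (PySem.Set.empty : List Int) = [] from rfl]
  rw [← List.foldl_flatMap (f := fun (e : Int × Int) => [e.1, e.2])]
  rw [show (List.foldl (fun duplicati node =>
        let c : Int := L.foldl (fun c e => if node = e.1 ∨ node = e.2 then c + 1 else c) 0
        if c > 1 then PySem.Set.add duplicati node else duplicati) [] (L.flatMap fun e => [e.1, e.2]))
      = (List.foldl (fun duplicati node =>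
        if pvCnt L node > 1 then PySem.Set.add duplicati node else duplicati) [] (pvAllNodes L)) from rfl]
  rw [PySem.List.foldl_ite_eq_foldl_filter (p := fun node => pvCnt L node > 1)]
  rw [← PySem.Set.ofList_eq_foldl, ofList_filter]
  have h : PySem.Set.ofList (pvAllNodes L) = PySem.Set.ofList (pvNodes L) := by
    rw [PySem.Set.ofList_eq_foldl, PySem.Set.ofList_eq_foldl]
    exact ofList_allNodes_eq L []
  rw [h]

theorem b_eq_filter (L : List (Int × Int)) :
    get_archi_duplicati_alt L
      = (PySem.Set.ofList (pvNodes L)).filter (fun n => decide (((pvNodes L).count n : Int) > 1)) := by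
  simp only [get_archi_duplicati_alt]
  rw [pvNodes_spec]
  rw [show ((pvNodes L).foldl (fun d n => d.modify n 0 (· + 1)) PySem.Dict.empty)
      = PySem.Dict.counter (pvNodes L) from rfl]
  rw [PySem.Dict.items_counter, List.filter_map, List.map_map]
  have h1 : ((fun p : Int × Int => decide (p.2 > 1)) ∘ fun k => (k, ((pvNodes L).count k : Int)))
      = fun n => decide (((pvNodes L).count n : Int) > 1) := by
    funext n; simp
  rw [h1]
  have h2 : ((Prod.fst ∘ fun k => (k, ((pvNodes L).count k : Int))) : Int → Int) = id := by
    funext n; rfl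
  rw [h2, List.map_id]
  exact PySem.Set.ofList_eq_self_of_nodup _ ((PySem.Set.nodup_ofList _).filter _)

-- ===== VERDICT (by name: the statement is the Claim_ definition above) =====
theorem get_archi_duplicati_spec : Claim_equal_get_archi_duplicati := by
  intro L _
  unfold Spec_get_archi_duplicati
  rw [a_eq_filter, b_eq_filter]
  apply List.filter_congr
  intro n _
  simp [pvCnt_eq_count]
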